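-- pv_equiv track=rewrite | github.com/pypi-data/pypi-mirror-359 | packages/biomomentum/biomomentum-0.1.9-py3-none-any.whl/biomomentum/utils.py | _find_data_separators
-- ===== SOURCE A (Python) =====
-- from typing import Any, Dict, List, Optional, Tuple
--
-- def _find_data_separators(lines: List[str], idxs: List[int]) -> Tuple[List[bool], List[int]]:
--     """
--     Identify <divider> markers within each function's <DATA> block.
--
--     Args:
--         lines: All lines of the file.
--         idxs: Indices of all section dividers (<INFO>, <END INFO>, <DATA>, <END DATA>).
--
--     Returns:
--         A tuple of:
--           - List of booleans indicating if each function has any <divider> tags.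
--           - List of all line indices where '<divider>' appears.
--     """
--     sep_idxs = [i for i, line in enumerate(lines, start=1) if '<divider>' in line]
--     funcs = len(idxs) // 4
--     flags: List[bool] = []
--     for i in range(funcs):
--         start, end = idxs[4*i + 2], idxs[4*i + 3]
--         flags.append(any(start < s < end for s in sep_idxs))
--     return flags, sep_idxs
-- ===== SOURCE B (Python) =====
-- def _bisect_right(a, x):
--     lo, hi = 0, len(a)
--     while lo < hi:
--         mid = (lo + hi) // 2
--         if a[mid] <= x:
--             lo = mid + 1
--         else:
--             hi = mid
--     return lo
--
-- def _find_data_separators(lines, idxs):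
--     sep_idxs = [i for i, line in enumerate(lines, start=1) if '<divider>' in line]
--     flags = []
--     for i in range(len(idxs) // 4):
--         start, end = idxs[4 * i + 2], idxs[4 * i + 3]
--         j = _bisect_right(sep_idxs, start)
--         flags.append(j < len(sep_idxs) and sep_idxs[j] < end)
--     return flags, sep_idxs
-- ===== Notes on version B (the rewrite author's own statement) =====
-- stated objective: alternative
-- what changed: B replaces A's per-function linear any() scan over sep_idxs with a hand-written bisect_right binary search on the ascending sep_idxs list (first separator > start, then one comparison against end), so the flag phase is O(F log S) instead of O(F*S).
import Mathlib
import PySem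

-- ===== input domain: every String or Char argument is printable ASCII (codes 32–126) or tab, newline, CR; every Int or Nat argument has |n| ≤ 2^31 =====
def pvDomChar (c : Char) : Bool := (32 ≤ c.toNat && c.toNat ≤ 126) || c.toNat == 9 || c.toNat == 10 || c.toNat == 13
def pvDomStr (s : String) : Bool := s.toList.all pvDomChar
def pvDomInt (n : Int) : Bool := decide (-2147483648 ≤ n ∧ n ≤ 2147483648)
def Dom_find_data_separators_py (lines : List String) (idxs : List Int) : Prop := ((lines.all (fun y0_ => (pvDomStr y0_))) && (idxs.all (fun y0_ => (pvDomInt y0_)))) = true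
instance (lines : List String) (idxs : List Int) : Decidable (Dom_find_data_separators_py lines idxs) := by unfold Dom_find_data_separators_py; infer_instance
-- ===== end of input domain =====

-- B replaces A's per-function linear any() scan of sep_idxs by a hand-written binary search
-- (bisect_right) over the ascending sep_idxs list (alternative algorithm; return value identical).


-- ===== PORT A =====
-- Port of A: sep_idxs comprehension, then for each function an inner any() scan of sep_idxs.
-- idxs indexing uses pyGetD: 4*i+2 and 4*i+3 are in range since 0 ≤ i < len(idxs)//4.
def find_data_separators_py (lines : List String) (idxs : List Int) : List Bool × List Int :=
  let sep_idxs := ((PySem.List.enumerate lines 1).filter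
      (fun p => PySem.Str.isIn "<divider>" p.2)).map (fun p => p.1)
  let funcs := PySem.Int.floordiv (idxs.length : Int) 4
  let flags := (PySem.List.pyRange 0 funcs 1).foldl (fun acc i =>
      let start := PySem.List.pyGetD idxs (4 * i + 2) 0
      let stop := PySem.List.pyGetD idxs (4 * i + 3) 0
      acc ++ [sep_idxs.any (fun s => decide (start < s) && decide (s < stop))]) []
  (flags, sep_idxs)

-- ===== PORT B =====
-- Port of B's _bisect_right: while lo < hi loop as recursion on hi - lo; lo, hi, mid are
-- nonneg Python ints carried as Nat ((lo+hi)//2 = Nat division there); a[mid] is in range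
-- whenever hi ≤ len a (so getD is exact for the in-range nonneg index).
def pv_bisect_go (a : List Int) (x : Int) (lo hi : Nat) : Nat :=
  if _h : lo < hi then
    let mid := (lo + hi) / 2
    if a.getD mid 0 ≤ x then pv_bisect_go a x (mid + 1) hi
    else pv_bisect_go a x lo mid
  else lo
termination_by hi - lo
decreasing_by all_goals omega

-- Port of B: same sep_idxs comprehension; each flag comes from one binary search
-- (first separator > start) followed by the `j < len and sep_idxs[j] < end` test.
def find_data_separators_py_alt (lines : List String) (idxs : List Int) : List Bool × List Int :=
  let sep_idxs := ((PySem.List.enumerate lines 1).filter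
      (fun p => PySem.Str.isIn "<divider>" p.2)).map (fun p => p.1)
  let flags := (PySem.List.pyRange 0 (PySem.Int.floordiv (idxs.length : Int) 4) 1).foldl
      (fun acc i =>
        let start := PySem.List.pyGetD idxs (4 * i + 2) 0
        let stop := PySem.List.pyGetD idxs (4 * i + 3) 0
        let j := pv_bisect_go sep_idxs start 0 sep_idxs.length
        acc ++ [decide (j < sep_idxs.length) && decide (sep_idxs.getD j 0 < stop)]) []
  (flags, sep_idxs)

-- ===== PRECONDITION & SPEC =====
def Spec_find_data_separators_py (lines : List String) (idxs : List Int) (out : List Bool × List Int) : Prop := out = find_data_separators_py_alt lines idxs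
instance (lines : List String) (idxs : List Int) (out : List Bool × List Int) : Decidable (Spec_find_data_separators_py lines idxs out) := by unfold Spec_find_data_separators_py; infer_instance

-- ===== CLAIM (what is proved, stated in full; the proofs are below) =====
def Claim_equal_find_data_separators_py : Prop := ∀ (lines : List String) (idxs : List Int), Dom_find_data_separators_py lines idxs → Spec_find_data_separators_py lines idxs (find_data_separators_py lines idxs)

-- ===== LEMMAS AND PROOFS =====

-- Binary-search invariant: on a list that is non-decreasing by index, pv_bisect_go returns a
-- split point r with everything below r ≤ x and everything from r on > x.
lemma pv_bisect_go_spec (a : List Int) (x : Int)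
    (hs : ∀ i j : Nat, i ≤ j → j < a.length → a.getD i 0 ≤ a.getD j 0) :
    ∀ n lo hi, hi - lo ≤ n → lo ≤ hi → hi ≤ a.length →
    (∀ k, k < lo → a.getD k 0 ≤ x) →
    (∀ k, hi ≤ k → k < a.length → x < a.getD k 0) →
    (∀ k, k < pv_bisect_go a x lo hi → a.getD k 0 ≤ x) ∧
    (∀ k, pv_bisect_go a x lo hi ≤ k → k < a.length → x < a.getD k 0) ∧
    pv_bisect_go a x lo hi ≤ a.length := by
  intro n
  induction n with
  | zero =>
    intro lo hi hn hlh hha hlow hhigh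
    have : lo = hi := by omega
    rw [pv_bisect_go]
    simp only [show ¬ lo < hi by omega, dif_neg, not_false_iff]
    subst this
    exact ⟨hlow, hhigh, by omega⟩
  | succ n ih =>
    intro lo hi hn hlh hha hlow hhigh
    rw [pv_bisect_go]
    by_cases h : lo < hi
    · simp only [dif_pos h]
      by_cases hm : a.getD ((lo + hi) / 2) 0 ≤ x
      · simp only [if_pos hm]
        refine ih ((lo + hi) / 2 + 1) hi (by omega) (by omega) hha ?_ hhigh
        intro k hk
        by_cases hkl : k < lo
        · exact hlow k hkl
        · exact le_trans (hs k ((lo + hi) / 2) (by omega) (by omega)) hm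
      · simp only [if_neg hm]
        refine ih lo ((lo + hi) / 2) (by omega) (by omega) (by omega) hlow ?_
        intro k hk hkl
        exact lt_of_not_ge (fun hle => hm (le_trans (hs ((lo + hi) / 2) k hk hkl) hle))
    · simp only [dif_neg h]
      have : lo = hi := by omega
      subst this
      exact ⟨hlow, hhigh, by omega⟩

-- Correctness of one flag: on a strictly increasing list, "some element lies strictly between
-- x and e" equals B's post-bisect test.
lemma any_eq_bisect (a : List Int) (ha : a.Pairwise (· < ·)) (x e : Int) :
    a.any (fun s => decide (x < s) && decide (s < e))
    = (decide (pv_bisect_go a x 0 a.length < a.length)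
        && decide (a.getD (pv_bisect_go a x 0 a.length) 0 < e)) := by
  have hs : ∀ i j : Nat, i ≤ j → j < a.length → a.getD i 0 ≤ a.getD j 0 := by
    intro i j hij hj
    rcases Nat.lt_or_ge i j with h | h
    · have := (List.pairwise_iff_getElem.mp ha) i j (by omega) hj h
      rw [a.getD_eq_getElem 0 (by omega), a.getD_eq_getElem 0 hj]
      exact le_of_lt this
    · have : i = j := by omega
      subst this; exact le_refl _
  obtain ⟨hlow, hhigh, hle⟩ := pv_bisect_go_spec a x hs a.length 0 a.length
    (by omega) (by omega) (le_refl _) (by omega) (by omega)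
  set r := pv_bisect_go a x 0 a.length with hr
  rcases Bool.eq_false_or_eq_true (a.any (fun s => decide (x < s) && decide (s < e))) with hA | hA
  · rw [hA]
    obtain ⟨s, hsmem, hst⟩ := List.any_eq_true.mp hA
    rw [Bool.and_eq_true, decide_eq_true_iff, decide_eq_true_iff] at hst
    obtain ⟨hxs, hse⟩ := hst
    obtain ⟨k, hk, hks⟩ := List.mem_iff_getElem.mp hsmem
    have hgk : a.getD k 0 = s := by rw [a.getD_eq_getElem 0 hk]; exact hks
    have hrk : r ≤ k := by
      by_contra hc
      exact absurd hxs (not_lt.mpr (hgk ▸ hlow k (by omega)))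
    have hrl : r < a.length := by omega
    have hare : a.getD r 0 < e := lt_of_le_of_lt (hgk ▸ hs r k hrk hk) hse
    symm
    rw [Bool.and_eq_true, decide_eq_true_iff, decide_eq_true_iff]
    exact ⟨hrl, hare⟩
  · rw [hA]
    symm
    by_contra hB
    rw [Bool.not_eq_false, Bool.and_eq_true, decide_eq_true_iff, decide_eq_true_iff] at hB
    obtain ⟨hrl, hre⟩ := hB
    have hmem : a.getD r 0 ∈ a := by
      rw [a.getD_eq_getElem 0 hrl]; exact a.getElem_mem hrl
    have := List.any_eq_false.mp hA (a.getD r 0) hmem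
    simp only [Bool.and_eq_true, decide_eq_true_iff, not_and] at this
    exact this (hhigh r (le_refl _) hrl) hre

-- sep_idxs is strictly increasing: enumerate indices ascend, filter and map fst preserve that.
lemma sep_sorted (lines : List String) :
    (((PySem.List.enumerate lines 1).filter
        (fun p => PySem.Str.isIn "<divider>" p.2)).map (fun p => p.1)).Pairwise (· < ·) := by
  rw [List.pairwise_map]
  exact (PySem.List.pairwise_lt_enumerate lines 1).filter _

-- ===== VERDICT (by name: the statement is the Claim_ definition above) =====
theorem find_data_separators_py_spec : Claim_equal_find_data_separators_py := by
  intro lines idxs _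
  simp only [Spec_find_data_separators_py, find_data_separators_py, find_data_separators_py_alt]
  rw [PySem.List.foldl_append_singleton_eq_map, PySem.List.foldl_append_singleton_eq_map]
  refine congrArg (fun fl => (fl, _)) ?_
  simp only [List.nil_append]
  refine List.map_congr_left (fun i _ => ?_)
  exact any_eq_bisect _ (sep_sorted lines) _ _
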